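-- pv_equiv track=rewrite | github.com/kpfaulkner/skajserver | Common/Utils.py | base36decode
-- ===== SOURCE A (Python) =====
-- def base36decode(input):
--
--   c = "0123456789ABCDEFGHIJKLMNOPQRSTUVWXYZ"
--   rv = pos = 0
--   charlist = list(input)
--   charlist.reverse()
--
--   for char in charlist:
--     rv += c.find(char) * 36**pos
--     pos += 1
--   return rv
-- ===== SOURCE B (Python) =====
-- def base36decode(input):
--   c = "0123456789ABCDEFGHIJKLMNOPQRSTUVWXYZ"
--   rv = 0
--   for char in input:
--     rv = rv * 36 + c.find(char)
--   return rv
-- ===== Notes on version B (the rewrite author's own statement) =====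
-- stated objective: faster
-- what changed: Horner's method scanning the string left-to-right (rv = rv*36 + digit) replaces A's reverse-the-list loop that tracks a position counter and recomputes the big-int power 36**pos for every character.
import Mathlib
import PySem

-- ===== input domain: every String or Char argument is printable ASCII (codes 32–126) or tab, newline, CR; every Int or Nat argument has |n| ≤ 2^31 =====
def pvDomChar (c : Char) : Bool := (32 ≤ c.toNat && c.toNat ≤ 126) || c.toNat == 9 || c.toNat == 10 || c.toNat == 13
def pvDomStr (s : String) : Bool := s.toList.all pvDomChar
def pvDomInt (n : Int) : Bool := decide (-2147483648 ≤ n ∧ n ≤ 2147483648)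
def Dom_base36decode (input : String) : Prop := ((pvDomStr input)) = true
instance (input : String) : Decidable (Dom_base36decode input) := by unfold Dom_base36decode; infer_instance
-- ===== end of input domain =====

-- B replaces A's reverse + per-position 36**pos power with a left-to-right Horner fold; objective: simpler.

-- shared digit lookup: Python's c.find(char) on c = "0123456789...Z" (-1 for absent chars)
def pvDigit (ch : Char) : Int :=
  PySem.Str.find "0123456789ABCDEFGHIJKLMNOPQRSTUVWXYZ" (String.mk [ch])

-- ===== PORT A =====
def base36decode (input : String) : Int :=
  let charlist := input.toList.reverse
  (charlist.foldl (fun (st : Int × Nat) char => (st.1 + pvDigit char * (36:Int) ^ st.2, st.2 + 1)) (0, 0)).1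

-- ===== PORT B =====
def base36decode_alt (input : String) : Int :=
  input.toList.foldl (fun rv char => rv * 36 + pvDigit char) 0

-- ===== PRECONDITION & SPEC =====
def Spec_base36decode (input : String) (out : Int) : Prop := out = base36decode_alt input
instance (input : String) (out : Int) : Decidable (Spec_base36decode input out) := by unfold Spec_base36decode; infer_instance

-- ===== CLAIM (what is proved, stated in full; the proofs are below) =====
def Claim_equal_base36decode : Prop := ∀ (input : String), Dom_base36decode input → Spec_base36decode input (base36decode input)

-- ===== LEMMAS AND PROOFS =====

-- H m = value of digit string m read least-significant-first
def pvH : List Char → Int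
  | [] => 0
  | ch :: t => pvDigit ch + 36 * pvH t

theorem pvH_append_single (m : List Char) (ch : Char) :
    pvH (m ++ [ch]) = (36:Int) ^ m.length * pvDigit ch + pvH m := by
  induction m with
  | nil => simp [pvH]
  | cons c t ih => simp [pvH, ih, pow_succ]; ring

theorem foldA_spec (m : List Char) (rv : Int) (pos : Nat) :
    (m.foldl (fun (st : Int × Nat) char => (st.1 + pvDigit char * (36:Int) ^ st.2, st.2 + 1)) (rv, pos)).1
      = rv + (36:Int) ^ pos * pvH m := by
  induction m generalizing rv pos with
  | nil => simp [pvH]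
  | cons c t ih => simp [List.foldl, ih, pvH, pow_succ]; ring

theorem foldB_spec (l : List Char) (rv : Int) :
    l.foldl (fun rv char => rv * 36 + pvDigit char) rv
      = rv * (36:Int) ^ l.length + pvH l.reverse := by
  induction l generalizing rv with
  | nil => simp [pvH]
  | cons c t ih =>
    simp [List.foldl, ih, pvH_append_single, pow_succ]
    ring

-- ===== VERDICT (by name: the statement is the Claim_ definition above) =====
theorem base36decode_spec : Claim_equal_base36decode := by
  intro input _
  unfold Spec_base36decode base36decode base36decode_alt
  rw [foldA_spec, foldB_spec]
  simp
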